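-- pv_equiv track=rewrite | github.com/LightingArb/mix_skill_people | generate_skill_extraction.py | collect_behavior_lines
-- ===== SOURCE A (Python) =====
-- from typing import Iterable
--
-- def dedupe_keep_order(lines: Iterable[str]) -> list[str]:
--     seen = set()
--     output = []
--     for line in lines:
--         key = line.strip()
--         if not key or key in seen:
--             continue
--         seen.add(key)
--         output.append(line)
--     return output
--
-- def collect_behavior_lines(lines: list[str]) -> tuple[list[str], list[str]]:
--     must_patterns = ("MUST", "ALWAYS", "REQUIRED", "Before ", "Use AskUserQuestion", "Only run", "Ask the user")
--     forbid_patterns = ("NEVER", "DO NOT", "don't", "Don't", "cannot", "not optional", "blocked", "skip this", "no fixes without")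
--     must_lines = []
--     forbid_lines = []
--     for line in lines:
--         if any(token in line for token in must_patterns):
--             must_lines.append(line)
--         if any(token in line for token in forbid_patterns):
--             forbid_lines.append(line)
--     return dedupe_keep_order(must_lines)[:12], dedupe_keep_order(forbid_lines)[:12]
-- ===== SOURCE B (Python) =====
-- def collect_behavior_lines(lines: list[str]) -> tuple[list[str], list[str]]:
--     must_patterns = ("MUST", "ALWAYS", "REQUIRED", "Before ", "Use AskUserQuestion", "Only run", "Ask the user")
--     forbid_patterns = ("NEVER", "DO NOT", "don't", "Don't", "cannot", "not optional", "blocked", "skip this", "no fixes without")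
--     must_seen, forbid_seen = set(), set()
--     must_lines, forbid_lines = [], []
--     for line in lines:
--         key = line.strip()
--         if not key:
--             continue
--         if len(must_lines) < 12 and key not in must_seen and any(t in line for t in must_patterns):
--             must_seen.add(key)
--             must_lines.append(line)
--         if len(forbid_lines) < 12 and key not in forbid_seen and any(t in line for t in forbid_patterns):
--             forbid_seen.add(key)
--             forbid_lines.append(line)
--     return must_lines, forbid_lines
-- ===== Notes on version B (the rewrite author's own statement) =====
-- stated objective: alternative
-- what changed: Single pass over lines maintaining two result lists with their seen-sets and a len<12 cap, instead of building full filtered lists, a separate dedupe helper and trailing slices.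
import Mathlib
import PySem

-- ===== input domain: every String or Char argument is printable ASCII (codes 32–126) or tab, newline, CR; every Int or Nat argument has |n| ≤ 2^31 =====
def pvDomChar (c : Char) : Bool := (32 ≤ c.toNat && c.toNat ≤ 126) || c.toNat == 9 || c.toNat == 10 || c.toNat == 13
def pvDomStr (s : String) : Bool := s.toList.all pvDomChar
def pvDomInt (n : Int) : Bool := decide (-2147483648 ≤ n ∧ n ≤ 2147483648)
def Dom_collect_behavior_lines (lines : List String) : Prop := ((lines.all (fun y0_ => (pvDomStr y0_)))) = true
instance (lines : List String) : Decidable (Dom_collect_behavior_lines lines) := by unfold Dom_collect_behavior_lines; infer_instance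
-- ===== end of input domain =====

-- B is an alternative decomposition: one pass keeping two capped, deduplicated result lists,
-- instead of A's filter passes + separate dedupe helper + trailing [:12] slices.

-- ===== PORT A =====
def pvMustPatterns : List String :=
  ["MUST", "ALWAYS", "REQUIRED", "Before ", "Use AskUserQuestion", "Only run", "Ask the user"]
def pvForbidPatterns : List String :=
  ["NEVER", "DO NOT", "don't", "Don't", "cannot", "not optional", "blocked", "skip this", "no fixes without"]

-- helper of A: dedupe_keep_order (seen is a Python set; key in seen / seen.add)
def dedupe_keep_order (lines : List String) : List String :=
  (lines.foldl
    (fun (st : PySem.Set String × List String) line =>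
      let key := PySem.Str.strip line
      if key == "" || PySem.Set.contains st.1 key then st
      else (PySem.Set.add st.1 key, st.2 ++ [line]))
    (PySem.Set.empty, [])).2

def collect_behavior_lines (lines : List String) : List String × List String :=
  let acc := lines.foldl
    (fun (st : List String × List String) line =>
      let st1 := if pvMustPatterns.any (fun token => PySem.Str.isIn token line)
                 then (st.1 ++ [line], st.2) else st
      if pvForbidPatterns.any (fun token => PySem.Str.isIn token line)
      then (st1.1, st1.2 ++ [line]) else st1)
    ([], [])
  -- [:12] on a list of nonnegative bound is exactly List.take 12
  ((dedupe_keep_order acc.1).take 12, (dedupe_keep_order acc.2).take 12)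

-- ===== PORT B =====
-- one category's update in B's single pass: cap, seen-set, pattern match, in Source B's order
def pvCatStep (pats : List String) (st : PySem.Set String × List String)
    (line : String) (key : String) : PySem.Set String × List String :=
  if decide (st.2.length < 12) && !(PySem.Set.contains st.1 key)
      && pats.any (fun t => PySem.Str.isIn t line)
  then (PySem.Set.add st.1 key, st.2 ++ [line]) else st

def collect_behavior_lines_alt (lines : List String) : List String × List String :=
  let st := lines.foldl
    (fun (st : (PySem.Set String × List String) × (PySem.Set String × List String)) line =>
      let key := PySem.Str.strip line
      if key == "" then st
      else (pvCatStep pvMustPatterns st.1 line key, pvCatStep pvForbidPatterns st.2 line key))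
    ((PySem.Set.empty, []), (PySem.Set.empty, []))
  (st.1.2, st.2.2)

-- ===== PRECONDITION & SPEC =====
def Spec_collect_behavior_lines (lines : List String) (out : List String × List String) : Prop := out = collect_behavior_lines_alt lines
instance (lines : List String) (out : List String × List String) : Decidable (Spec_collect_behavior_lines lines out) := by unfold Spec_collect_behavior_lines; infer_instance

-- ===== CLAIM (what is proved, stated in full; the proofs are below) =====
def Claim_equal_collect_behavior_lines : Prop := ∀ (lines : List String), Dom_collect_behavior_lines lines → Spec_collect_behavior_lines lines (collect_behavior_lines lines)

-- ===== LEMMAS AND PROOFS =====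

-- A's filter loop builds exactly the two filtered lists
lemma filt_loop (lines : List String) (a b : List String) :
    lines.foldl
      (fun (st : List String × List String) line =>
        let st1 := if pvMustPatterns.any (fun token => PySem.Str.isIn token line)
                   then (st.1 ++ [line], st.2) else st
        if pvForbidPatterns.any (fun token => PySem.Str.isIn token line)
        then (st1.1, st1.2 ++ [line]) else st1)
      (a, b)
    = (a ++ lines.filter (fun l => pvMustPatterns.any (fun t => PySem.Str.isIn t l)),
       b ++ lines.filter (fun l => pvForbidPatterns.any (fun t => PySem.Str.isIn t l))) := by
  induction lines generalizing a b with
  | nil => simp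
  | cons l ls ih =>
    simp only [List.foldl_cons, List.filter_cons]
    split_ifs <;> simp [ih] <;> simp_all

-- B's fused loop splits componentwise
lemma fused_split (lines : List String)
    (s t : PySem.Set String × List String) :
    lines.foldl
      (fun (st : (PySem.Set String × List String) × (PySem.Set String × List String)) line =>
        let key := PySem.Str.strip line
        if key == "" then st
        else (pvCatStep pvMustPatterns st.1 line key, pvCatStep pvForbidPatterns st.2 line key))
      (s, t)
    = (lines.foldl (fun s line =>
          let key := PySem.Str.strip line
          if key == "" then s else pvCatStep pvMustPatterns s line key) s,
       lines.foldl (fun t line =>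
          let key := PySem.Str.strip line
          if key == "" then t else pvCatStep pvForbidPatterns t line key) t) := by
  induction lines generalizing s t with
  | nil => rfl
  | cons l ls ih =>
    simp only [List.foldl_cons]
    split_ifs with hk
    · exact ih s t
    · exact ih _ _

-- the dedupe loop's output list only grows: starting output is a prefix
lemma dedupe_out_prefix (lines : List String) (seen : PySem.Set String) (out : List String) :
    lines.foldl
      (fun (st : PySem.Set String × List String) line =>
        let key := PySem.Str.strip line
        if key == "" || PySem.Set.contains st.1 key then st
        else (PySem.Set.add st.1 key, st.2 ++ [line]))
      (seen, out)
    = ((lines.foldl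
        (fun (st : PySem.Set String × List String) line =>
          let key := PySem.Str.strip line
          if key == "" || PySem.Set.contains st.1 key then st
          else (PySem.Set.add st.1 key, st.2 ++ [line]))
        (seen, [])).1,
       out ++ (lines.foldl
        (fun (st : PySem.Set String × List String) line =>
          let key := PySem.Str.strip line
          if key == "" || PySem.Set.contains st.1 key then st
          else (PySem.Set.add st.1 key, st.2 ++ [line]))
        (seen, [])).2) := by
  induction lines generalizing seen out with
  | nil => simp
  | cons l ls ih =>
    simp only [List.foldl_cons]
    split_ifs with h
    · exact ih seen out
    · rw [ih _ (out ++ [l]), ih _ ([] ++ [l])]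
      simp

-- once the cap is reached, B's per-category loop is inert
lemma fused_stuck (pats : List String) (lines : List String)
    (seen : PySem.Set String) (out : List String) (h : ¬ out.length < 12) :
    lines.foldl (fun s line =>
        let key := PySem.Str.strip line
        if key == "" then s else pvCatStep pats s line key) (seen, out)
    = (seen, out) := by
  induction lines with
  | nil => rfl
  | cons l ls ih =>
    simp only [List.foldl_cons]
    have hdec : decide ((seen, out).2.length < 12) = false := by simpa using h
    have hst : pvCatStep pats (seen, out) l (PySem.Str.strip l) = (seen, out) := by
      simp only [pvCatStep, hdec, Bool.false_and, Bool.false_eq_true, if_false]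
    split_ifs with hk
    · exact ih
    · rw [hst]; exact ih

-- main invariant: B's capped per-category loop equals take 12 of A's dedupe of the filtered rest
lemma cat_main (pats : List String) (lines : List String)
    (seen : PySem.Set String) (out : List String) (h : out.length ≤ 12) :
    (lines.foldl (fun s line =>
        let key := PySem.Str.strip line
        if key == "" then s else pvCatStep pats s line key) (seen, out)).2
    = (((lines.filter (fun l => pats.any (fun t => PySem.Str.isIn t l))).foldl
        (fun (st : PySem.Set String × List String) line =>
          let key := PySem.Str.strip line
          if key == "" || PySem.Set.contains st.1 key then st
          else (PySem.Set.add st.1 key, st.2 ++ [line]))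
        (seen, out)).2).take 12 := by
  induction lines generalizing seen out with
  | nil => simpa using (List.take_of_length_le h).symm
  | cons l ls ih =>
    simp only [List.foldl_cons, List.filter_cons]
    by_cases hp : pats.any (fun t => PySem.Str.isIn t l) = true
    · simp only [hp, if_true]
      by_cases hk : (PySem.Str.strip l == "") = true
      · -- empty key: both loops skip the line
        simp only [hk, if_true, List.foldl_cons, Bool.true_or, if_pos]
        exact ih seen out h
      · simp only [hk, if_false, List.foldl_cons]
        by_cases hc : PySem.Set.contains seen (PySem.Str.strip l) = true
        · -- already seen: both skip
          have hm : PySem.Str.strip l ∈ seen := by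
            simpa [PySem.Set.contains] using hc
          have : pvCatStep pats (seen, out) l (PySem.Str.strip l) = (seen, out) := by
            simp [pvCatStep, hm]
          simp only [this, hk, hc, Bool.false_or, if_pos rfl]
          exact ih seen out h
        · by_cases hlen : out.length < 12
          · -- both append
            have hcond : (decide ((seen, out).2.length < 12)
                && !(PySem.Set.contains (seen, out).1 (PySem.Str.strip l))
                && pats.any (fun t => PySem.Str.isIn t l)) = true := by
              have hm' : PySem.Str.strip l ∉ seen := by
                simpa [PySem.Set.contains] using hc
              simp only [hp, Bool.and_true]; simp [hlen, hm']
            have hstep : pvCatStep pats (seen, out) l (PySem.Str.strip l)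
                = (PySem.Set.add seen (PySem.Str.strip l), out ++ [l]) := by
              simp only [pvCatStep, hcond, if_true]
            have hk' : (PySem.Str.strip l == "") = false := by simpa using hk
            have hc' : seen.contains (PySem.Str.strip l) = false := by simpa using hc
            simp only [hstep, hk', hc', Bool.false_or, Bool.or_false, Bool.false_eq_true, if_false]
            exact ih _ _ (by simp; omega)
          · -- cap reached: B is inert, A appends past the slice
            have hcond : (decide ((seen, out).2.length < 12)
                && !(PySem.Set.contains (seen, out).1 (PySem.Str.strip l))
                && pats.any (fun t => PySem.Str.isIn t l)) = false := by
              have hdec : decide ((seen, out).2.length < 12) = false := by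
                simpa using hlen
              simp only [hdec, Bool.false_and]
            have hstep : pvCatStep pats (seen, out) l (PySem.Str.strip l) = (seen, out) := by
              simp only [pvCatStep, hcond, Bool.false_eq_true, if_false]
            have h12 : out.length = 12 := by omega
            have hk' : (PySem.Str.strip l == "") = false := by simpa using hk
            have hc' : seen.contains (PySem.Str.strip l) = false := by simpa using hc
            simp only [hstep, hk', hc', Bool.false_or, Bool.or_false, Bool.false_eq_true, if_false]
            rw [fused_stuck pats ls seen out hlen,
                dedupe_out_prefix (ls.filter _) _ (out ++ [l])]
            simp [List.take_append_of_le_length (by omega : 12 ≤ out.length),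
                  List.take_of_length_le (le_of_eq h12)]
    · -- line matches no pattern: A filters it out; B's step is inert on it
      simp only [hp, Bool.false_eq_true, if_false]
      by_cases hk : (PySem.Str.strip l == "") = true
      · simp only [hk, if_pos rfl]
        exact ih seen out h
      · have hp' : (pats.any fun t => PySem.Str.isIn t l) = false := by simpa using hp
        have : pvCatStep pats (seen, out) l (PySem.Str.strip l) = (seen, out) := by
          simp only [pvCatStep, hp', Bool.and_false, Bool.false_eq_true, if_false]
        simp only [hk, Bool.false_eq_true, if_false, this]
        exact ih seen out h

-- ===== VERDICT (by name: the statement is the Claim_ definition above) =====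
theorem collect_behavior_lines_spec : Claim_equal_collect_behavior_lines := by
  intro lines _
  unfold Spec_collect_behavior_lines collect_behavior_lines collect_behavior_lines_alt
  simp only [filt_loop lines [] [], List.nil_append]
  rw [fused_split]
  unfold dedupe_keep_order
  simp only
  rw [cat_main pvMustPatterns lines PySem.Set.empty [] (by simp),
      cat_main pvForbidPatterns lines PySem.Set.empty [] (by simp)]
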